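-- pv_equiv track=rewrite | github.com/Code-for-Funabashi/linebot | mybot/garbage_bot/views.py | get_first_weekdays
-- ===== SOURCE A (Python) =====
-- def get_first_weekdays(year, month):
--     """
--         input : year=2021, month=4
--         output: [(1, 3), (2, 4), (3, 5), (4, 6), (5, 0), (6, 1), (7, 2)]
--               :  means [(2021/04/01, 3(Thu)), (2021/04/02, 4(Fri)), .., (2021/04/07, 2(Wed)]
--     """
--     from calendar import Calendar
--     cal = Calendar()
--     first_week = cal.monthdayscalendar(year, month)[0]
--     wd_1st = first_week.index(1)
--
--     first_weekdays = []
--     for d in range(1, 8):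
--         first_weekdays.append((d, (wd_1st + d - 1)%7))
--     return first_weekdays
-- ===== SOURCE B (Python) =====
-- def get_first_weekdays(year, month):
--     from calendar import Calendar
--     first_weekdays = []
--     for day, weekday in Calendar().itermonthdays2(year, month):
--         if day == 0:
--             continue
--         first_weekdays.append((day, weekday))
--         if len(first_weekdays) == 7:
--             break
--     return first_weekdays
-- ===== Notes on version B (the rewrite author's own statement) =====
-- stated objective: idiomatic
-- what changed: B walks Calendar().itermonthdays2's (day, weekday) stream, skipping the zero padding days and stopping after seven collected pairs, instead of locating day 1 in the first week with list.index and recomputing each weekday by (wd_1st + d - 1) % 7.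
import Mathlib
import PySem

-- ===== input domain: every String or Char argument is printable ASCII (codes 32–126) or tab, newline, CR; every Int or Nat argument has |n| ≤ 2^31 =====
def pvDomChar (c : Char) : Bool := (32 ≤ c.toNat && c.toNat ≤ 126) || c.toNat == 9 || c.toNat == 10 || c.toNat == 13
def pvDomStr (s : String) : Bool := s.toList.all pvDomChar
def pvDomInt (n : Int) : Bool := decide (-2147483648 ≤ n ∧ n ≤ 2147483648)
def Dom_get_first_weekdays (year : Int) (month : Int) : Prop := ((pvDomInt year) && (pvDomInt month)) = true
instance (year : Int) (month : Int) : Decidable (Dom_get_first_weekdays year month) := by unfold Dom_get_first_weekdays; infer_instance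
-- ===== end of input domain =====

-- B iterates the calendar's (day, weekday) stream directly (itermonthdays2), skipping padding
-- zeros and stopping at seven pairs, instead of A's list.index of day 1 plus (wd_1st+d-1)%7 loop.
-- Both Pythons call the stdlib `calendar` module; its internals (weekday of the 1st via the
-- proleptic-Gregorian ordinal, month length, the padded month-day stream) are ported once below
-- as shared helpers, exactly as CPython computes them (incl. the `2000 + year % 400` remap,
-- which the ordinal formula under floor division reproduces mod 7).

-- shared helpers: port of the CPython `calendar`/`datetime` computations both sources invoke
def pvIsLeap (y : Int) : Bool :=
  PySem.Int.mod y 4 == 0 && (PySem.Int.mod y 100 != 0 || PySem.Int.mod y 400 == 0)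

-- weekday (Mon=0) of the 1st of the month: (toordinal - 1) % 7 with Python floor division
def pvDay1 (y m : Int) : Int :=
  PySem.Int.mod ((y - 1) * 365 + PySem.Int.floordiv (y - 1) 4 - PySem.Int.floordiv (y - 1) 100
      + PySem.Int.floordiv (y - 1) 400
      + PySem.List.pyGetD [0, 31, 59, 90, 120, 151, 181, 212, 243, 273, 304, 334] (m - 1) 0
      + (if 2 < m ∧ pvIsLeap y then 1 else 0)) 7

def pvMonthLen (y m : Int) : Int :=
  PySem.List.pyGetD [31, 28, 31, 30, 31, 30, 31, 31, 30, 31, 30, 31] (m - 1) 0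
    + (if m = 2 ∧ pvIsLeap y then 1 else 0)

-- Calendar.itermonthdays (firstweekday = 0): padding zeros, then 1..ndays, then padding zeros
def pvMonthDays (day1 ndays : Int) : List Int :=
  List.replicate (PySem.Int.mod day1 7).toNat 0
    ++ PySem.List.pyRange 1 (ndays + 1) 1
    ++ List.replicate (PySem.Int.mod (0 - day1 - ndays) 7).toNat 0

-- ===== PORT A =====
def pvACore (day1 ndays : Int) : List (Int × Int) :=
  let first_week := (pvMonthDays day1 ndays).take 7          -- monthdayscalendar(year, month)[0]
  let wd_1st : Int := ((PySem.List.index? first_week 1).getD 0 : Nat)  -- .index(1); 1 is always present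
  (PySem.List.pyRange 1 8 1).foldl
    (fun acc d => acc ++ [(d, PySem.Int.mod (wd_1st + d - 1) 7)]) []

def get_first_weekdays (year : Int) (month : Int) : List (Int × Int) :=
  pvACore (pvDay1 year month) (pvMonthLen year month)

-- ===== PORT B =====
-- the collecting loop: skip day 0, append, break once seven pairs are collected
def pvBLoop : List (Int × Int) → List (Int × Int) → List (Int × Int)
  | acc, [] => acc
  | acc, (d, w) :: rest =>
    if d = 0 then pvBLoop acc rest
    else
      let acc' := acc ++ [(d, w)]
      if acc'.length = 7 then acc' else pvBLoop acc' rest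

def pvBCore (day1 ndays : Int) : List (Int × Int) :=
  -- itermonthdays2: enumerate itermonthdays from firstweekday = 0, weekday = i % 7
  let stream := (PySem.List.enumerate (pvMonthDays day1 ndays) 0).map
    (fun p => (p.2, PySem.Int.mod p.1 7))
  pvBLoop [] stream

def get_first_weekdays_alt (year : Int) (month : Int) : List (Int × Int) :=
  pvBCore (pvDay1 year month) (pvMonthLen year month)

-- ===== PRECONDITION & SPEC =====
-- Python raises calendar.IllegalMonthError unless 1 <= month <= 12 (any integer year is accepted)
def Pre_get_first_weekdays (year : Int) (month : Int) : Prop := 1 ≤ month ∧ month ≤ 12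
instance (year : Int) (month : Int) : Decidable (Pre_get_first_weekdays year month) := by
  unfold Pre_get_first_weekdays; infer_instance
def pvWitness_get_first_weekdays : Int × Int := (2021, 4)

def Spec_get_first_weekdays (year : Int) (month : Int) (out : List (Int × Int)) : Prop := out = get_first_weekdays_alt year month
instance (year : Int) (month : Int) (out : List (Int × Int)) : Decidable (Spec_get_first_weekdays year month out) := by unfold Spec_get_first_weekdays; infer_instance

-- ===== CLAIM (what is proved, stated in full; the proofs are below) =====
def Claim_equal_get_first_weekdays : Prop := ∀ (year : Int) (month : Int), Dom_get_first_weekdays year month → Pre_get_first_weekdays year month → Spec_get_first_weekdays year month (get_first_weekdays year month)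

-- ===== LEMMAS AND PROOFS =====

lemma pvDay1_bounds (y m : Int) : 0 ≤ pvDay1 y m ∧ pvDay1 y m < 7 := by
  unfold pvDay1
  rw [PySem.Int.mod_eq_emod_of_pos (by norm_num)]
  constructor
  · exact Int.emod_nonneg _ (by norm_num)
  · exact Int.emod_lt_of_pos _ (by norm_num)

lemma pvMonthLen_bounds (y m : Int) (h1 : 1 ≤ m) (h2 : m ≤ 12) : 28 ≤ pvMonthLen y m := by
  unfold pvMonthLen
  interval_cases m <;> simp [PySem.List.pyGetD, PySem.List.pyGet?, PySem.List.pyIdx?] <;>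
    split_ifs <;> norm_num

lemma pyRange_split (n : Int) (hn : 28 ≤ n) :
    PySem.List.pyRange 1 (n + 1) 1 = ([1, 2, 3, 4, 5, 6, 7] : List Int) ++ PySem.List.pyRange 8 (n + 1) 1 := by
  have h : PySem.List.pyRange 1 8 1 = ([1, 2, 3, 4, 5, 6, 7] : List Int) := by decide
  rw [PySem.List.pyRange_one_append 1 8 (n + 1) (by norm_num) (by omega), h]

lemma core_eq (w n : Int) (hw0 : 0 ≤ w) (hw : w < 7) (hn : 28 ≤ n) :
    pvACore w n = pvBCore w n := by
  have hmod : PySem.Int.mod w 7 = w := by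
    rw [PySem.Int.mod_eq_emod_of_pos (by norm_num)]
    exact Int.emod_eq_of_lt hw0 hw
  unfold pvACore pvBCore pvMonthDays
  rw [hmod, pyRange_split n hn]
  interval_cases w <;>
    simp [PySem.List.enumerate_append, PySem.List.enumerate_cons, PySem.List.enumerate,
      PySem.List.index?_eq_idxOf?, PySem.List.pyRange, pvBLoop, PySem.Int.mod,
      List.replicate, List.take] <;>
    decide

-- ===== VERDICT (by name: the statement is the Claim_ definition above) =====
theorem get_first_weekdays_spec : Claim_equal_get_first_weekdays := by
  intro year month _ hpre
  unfold Spec_get_first_weekdays get_first_weekdays get_first_weekdays_alt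
  exact core_eq _ _ (pvDay1_bounds year month).1 (pvDay1_bounds year month).2
    (pvMonthLen_bounds year month hpre.1 hpre.2)
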